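-- pv_equiv track=rewrite | github.com/johnfan12/Map_nav | strategy.py | shifty_shifts
-- ===== SOURCE A (Python) =====
-- def shifty_shifts(start, goal, limit):
--     """A diff function for autocorrect that determines how many letters
--     in START need to be substituted to create GOAL, then adds the difference in
--     their lengths.
--     """
--     # BEGIN PROBLEM 6
--     if limit == -1:
--         return 0
--     elif len(start) == 0 or len(goal) == 0:
--         return abs(len(goal) - len(start))
--     else:
--         if start[0] == goal[0]:
--             return shifty_shifts(start[1:], goal[1:], limit)
--         if goal[0] == '_':
--             return shifty_shifts(start, goal[1:], limit)
--         else: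
--             return 1 + shifty_shifts(start[1:], goal[1:], limit - 1)
-- ===== SOURCE B (Python) =====
-- def shifty_shifts(start, goal, limit):
--     """Iterative single pass over indices with an accumulator; no slicing."""
--     i = j = acc = 0
--     n, m = len(start), len(goal)
--     while True:
--         if limit == -1:
--             return acc
--         if i == n or j == m:
--             return acc + abs((m - j) - (n - i))
--         if start[i] == goal[j]:
--             i += 1
--             j += 1
--         elif goal[j] == '_':
--             j += 1
--         else:
--             acc += 1
--             limit -= 1
--             i += 1
--             j += 1
-- ===== Notes on version B (the rewrite author's own statement) =====
-- stated objective: faster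
-- what changed: Replaced the slicing recursion by an iterative single pass over two string indices with an accumulated substitution count, eliminating the O(n) string copy per step.
import Mathlib
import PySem

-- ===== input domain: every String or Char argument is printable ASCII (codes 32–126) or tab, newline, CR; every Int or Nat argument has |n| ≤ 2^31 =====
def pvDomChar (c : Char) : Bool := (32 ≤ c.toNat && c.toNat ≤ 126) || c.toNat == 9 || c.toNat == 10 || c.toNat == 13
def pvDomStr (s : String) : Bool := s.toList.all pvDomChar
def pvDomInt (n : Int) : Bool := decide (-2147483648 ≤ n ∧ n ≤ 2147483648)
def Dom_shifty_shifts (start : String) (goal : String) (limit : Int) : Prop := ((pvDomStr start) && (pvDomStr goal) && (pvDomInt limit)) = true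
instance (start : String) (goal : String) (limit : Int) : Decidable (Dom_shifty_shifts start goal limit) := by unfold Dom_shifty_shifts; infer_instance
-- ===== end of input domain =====

-- B replaces A's slicing recursion by an iterative single pass over two indices with an accumulator (faster: no per-step string copy).

-- ===== PORT A =====
-- literal transliteration of A's recursion (strings handled as their char lists; slicing `x[1:]` = dropping the head)
def shiftyRecA : List Char → List Char → Int → Int
  | s, g, limit =>
    if limit = -1 then 0
    else
      match s, g with
      | [], g => (((g.length : Int) - 0).natAbs : Int)
      | s, [] => ((0 - (s.length : Int)).natAbs : Int)
      | a :: s', b :: g' =>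
        if a = b then shiftyRecA s' g' limit
        else if b = '_' then shiftyRecA (a :: s') g' limit
        else 1 + shiftyRecA s' g' (limit - 1)
  termination_by s g _ => s.length + g.length
  decreasing_by all_goals (simp_all; try omega)

def shifty_shifts (start : String) (goal : String) (limit : Int) : Int :=
  shiftyRecA start.toList goal.toList limit

-- ===== PORT B =====
-- literal transliteration of Source B's while-loop: indices i, j, accumulator acc.
-- (the `n ≤ i` / `m ≤ j` guard is Source B's `i == n or j == m` test, written inclusively only to make the recursion total;
--  the loop only ever reaches i ≤ n, j ≤ m, where the two tests coincide)
def shiftyLoopB (s g : List Char) (n m : Nat) (i j : Nat) (limit acc : Int) : Int :=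
  if limit = -1 then acc
  else if n ≤ i ∨ m ≤ j then acc + ((((m : Int) - j) - ((n : Int) - i)).natAbs : Int)
  else if s.getD i ' ' = g.getD j ' ' then shiftyLoopB s g n m (i + 1) (j + 1) limit acc
  else if g.getD j ' ' = '_' then shiftyLoopB s g n m i (j + 1) limit acc
  else shiftyLoopB s g n m (i + 1) (j + 1) (limit - 1) (acc + 1)
  termination_by (n - i) + (m - j)
  decreasing_by all_goals omega

def shifty_shifts_alt (start : String) (goal : String) (limit : Int) : Int :=
  shiftyLoopB start.toList goal.toList start.toList.length goal.toList.length 0 0 limit 0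

-- ===== PRECONDITION & SPEC =====
def Spec_shifty_shifts (start : String) (goal : String) (limit : Int) (out : Int) : Prop := out = shifty_shifts_alt start goal limit
instance (start : String) (goal : String) (limit : Int) (out : Int) : Decidable (Spec_shifty_shifts start goal limit out) := by unfold Spec_shifty_shifts; infer_instance

-- ===== CLAIM (what is proved, stated in full; the proofs are below) =====
def Claim_equal_shifty_shifts : Prop := ∀ (start : String) (goal : String) (limit : Int), Dom_shifty_shifts start goal limit → Spec_shifty_shifts start goal limit (shifty_shifts start goal limit)

-- ===== LEMMAS AND PROOFS =====

-- loop invariant: B's loop from indices (i, j) computes acc + A's recursion on the dropped suffixes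
lemma shiftyLoopB_eq (s g : List Char) :
    ∀ i j limit acc, i ≤ s.length → j ≤ g.length →
      shiftyLoopB s g s.length g.length i j limit acc
        = acc + shiftyRecA (s.drop i) (g.drop j) limit := by
  intro i j limit acc hi hj
  induction hn : (s.length - i) + (g.length - j) using Nat.strong_induction_on
    generalizing i j limit acc with
  | _ k ih =>
  rw [shiftyLoopB.eq_def, shiftyRecA.eq_def]
  by_cases hl : limit = -1
  · simp [hl]
  · simp only [hl, if_false]
    by_cases hend : s.length ≤ i ∨ g.length ≤ j
    · simp only [hend, if_true]
      rcases hend with h | h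
      · have : i = s.length := le_antisymm hi h
        subst this
        simp [List.drop_length]
        rcases abs_cases ((g.length : Int) - j) with ⟨h1, h2⟩ | ⟨h1, h2⟩ <;> omega
      · have : j = g.length := le_antisymm hj h
        subst this
        rcases Nat.lt_or_ge i s.length with hi' | hi'
        · have hs : s.drop i ≠ [] := by
            simp [List.drop_eq_nil_iff]; omega
          match hd : s.drop i with
          | [] => exact absurd hd hs
          | a :: s' =>
            have hlen : (s.drop i).length = s.length - i := List.length_drop ..
            rw [hd] at hlen
            simp [List.drop_length]
            have e1 : |(i : Int) - (s.length : Int)| = (s.length : Int) - i := by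
              rw [abs_of_nonpos (by omega)]; ring
            have e2 : |(-1 : Int) + -(s'.length : Int)| = 1 + (s'.length : Int) := by
              rw [abs_of_nonpos (by omega)]; ring
            simp only [List.length_cons] at hlen
            rw [e1, e2]
            omega
        · have : i = s.length := le_antisymm hi hi'
          subst this
          simp [List.drop_length]
      -- end of base case
    · simp only [hend, if_false]
      push Not at hend
      obtain ⟨hi', hj'⟩ := hend
      have hds : s.drop i = s[i] :: s.drop (i + 1) := (List.getElem_cons_drop hi').symm
      have hdg : g.drop j = g[j] :: g.drop (j + 1) := (List.getElem_cons_drop hj').symm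
      have hgs : s.getD i ' ' = s[i] := List.getD_eq_getElem s ' ' hi'
      have hgg : g.getD j ' ' = g[j] := List.getD_eq_getElem g ' ' hj'
      rw [hds, hdg, hgs, hgg]
      by_cases heq : s[i] = g[j]
      · simp only [heq, if_true]
        exact ih _ (by omega) (i + 1) (j + 1) limit acc (by omega) (by omega) rfl
      · simp only [heq, if_false]
        by_cases hu : g[j] = '_'
        · simp only [hu, if_true]
          have := ih _ (by omega) i (j + 1) limit acc hi (by omega) rfl
          rw [this, hds]
        · simp only [hu, if_false]
          have := ih _ (by omega) (i + 1) (j + 1) (limit - 1) (acc + 1) (by omega) (by omega) rfl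
          rw [this]; ring

-- ===== VERDICT (by name: the statement is the Claim_ definition above) =====
theorem shifty_shifts_spec : Claim_equal_shifty_shifts := by
  intro start goal limit _
  unfold Spec_shifty_shifts shifty_shifts shifty_shifts_alt
  rw [shiftyLoopB_eq start.toList goal.toList 0 0 limit 0 (Nat.zero_le _) (Nat.zero_le _)]
  simp
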